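-- pv_equiv track=rewrite | github.com/Wang-SecurityResearch/LuoDllHack | luodllhack/analysis/taint.py | _get_register_aliases
-- ===== SOURCE A (Python) =====
-- from typing import Dict, List, Any, Optional, Set, Tuple
--
-- def _get_register_aliases(reg_name: str) -> Set[str]:
--     """Get all aliases for a register"""
--     reg_name = reg_name.lower()
--
--     # x64 register alias mapping
--     x64_aliases = {
--         'rax': {'rax', 'eax', 'ax', 'al', 'ah'},
--         'rbx': {'rbx', 'ebx', 'bx', 'bl', 'bh'},
--         'rcx': {'rcx', 'ecx', 'cx', 'cl', 'ch'},
--         'rdx': {'rdx', 'edx', 'dx', 'dl', 'dh'},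
--         'rsi': {'rsi', 'esi', 'si', 'sil'},
--         'rdi': {'rdi', 'edi', 'di', 'dil'},
--         'rsp': {'rsp', 'esp', 'sp', 'spl'},
--         'rbp': {'rbp', 'ebp', 'bp', 'bpl'},
--         'r8': {'r8', 'r8d', 'r8w', 'r8b'},
--         'r9': {'r9', 'r9d', 'r9w', 'r9b'},
--         'r10': {'r10', 'r10d', 'r10w', 'r10b'},
--         'r11': {'r11', 'r11d', 'r11w', 'r11b'},
--         'r12': {'r12', 'r12d', 'r12w', 'r12b'},
--         'r13': {'r13', 'r13d', 'r13w', 'r13b'},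
--         'r14': {'r14', 'r14d', 'r14w', 'r14b'},
--         'r15': {'r15', 'r15d', 'r15w', 'r15b'},
--     }
--
--     for full_reg, aliases in x64_aliases.items():
--         if reg_name in aliases:
--             return aliases
--
--     return {reg_name}
-- ===== SOURCE B (Python) =====
-- def _get_register_aliases(reg_name: str):
--     """Get all aliases for a register, derived from x64 naming rules
--     instead of a lookup table: sub-register names are decoded (prefix,
--     width suffix) to a canonical base and the alias group is rebuilt
--     from that base by construction."""
--     r = reg_name.lower()
--
--     # numbered registers r8..r15: canonical name plus d/w/b width suffixes
--     if r.startswith('r'):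
--         body = r[1:]
--         if body.endswith(('d', 'w', 'b')):
--             body = body[:-1]
--         if body in ('8', '9', '10', '11', '12', '13', '14', '15'):
--             base = 'r' + body
--             return {base, base + 'd', base + 'w', base + 'b'}
--
--     # legacy byte-addressable registers a/b/c/d: rCx, eCx, Cx, Cl, Ch
--     c = ''
--     if len(r) == 3 and r[0] in ('r', 'e') and r[2] == 'x':
--         c = r[1]
--     elif len(r) == 2 and r[1] in ('x', 'l', 'h'):
--         c = r[0]
--     if c in ('a', 'b', 'c', 'd'):
--         return {'r' + c + 'x', 'e' + c + 'x', c + 'x', c + 'l', c + 'h'}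
--
--     # pointer/index registers si, di, sp, bp: rB, eB, B, Bl
--     b = ''
--     if len(r) == 3 and r[0] in ('r', 'e'):
--         b = r[1:]
--     elif len(r) == 3 and r[2] == 'l':
--         b = r[:2]
--     elif len(r) == 2:
--         b = r
--     if b in ('si', 'di', 'sp', 'bp'):
--         return {'r' + b, 'e' + b, b, b + 'l'}
--
--     return {r}
-- ===== Notes on version B (the rewrite author's own statement) =====
-- stated objective: alternative
-- what changed: B drops A's alias table and scan entirely: it decodes the register name by x64 naming rules (strip the r prefix / d-w-b width suffix for r8-r15, recognise the rCx/eCx/Cx/Cl/Ch and rB/eB/B/Bl shapes for the legacy and pointer registers) and rebuilds the alias set from the decoded base by string construction.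
import Mathlib
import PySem

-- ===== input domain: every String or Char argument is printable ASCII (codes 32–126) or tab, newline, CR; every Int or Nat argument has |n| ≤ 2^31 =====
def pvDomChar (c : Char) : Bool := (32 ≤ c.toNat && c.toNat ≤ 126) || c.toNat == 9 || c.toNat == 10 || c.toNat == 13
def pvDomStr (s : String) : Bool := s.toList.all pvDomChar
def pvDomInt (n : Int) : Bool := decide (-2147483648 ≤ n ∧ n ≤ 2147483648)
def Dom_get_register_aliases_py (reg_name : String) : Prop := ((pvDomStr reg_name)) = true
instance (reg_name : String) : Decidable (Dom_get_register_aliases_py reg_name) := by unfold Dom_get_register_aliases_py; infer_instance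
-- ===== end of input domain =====

set_option maxRecDepth 8192

-- B derives the alias group from x64 naming rules (prefix/width-suffix decoding) instead of A's table scan; same return value proved for every input string.


-- ===== PORT A =====
-- the x64 alias table, in A's literal order (Python set literals ported as lists of their distinct elements)
def pvGroupsA : List (String × List String) := [("rax", ["rax", "eax", "ax", "al", "ah"]),
  ("rbx", ["rbx", "ebx", "bx", "bl", "bh"]),
  ("rcx", ["rcx", "ecx", "cx", "cl", "ch"]),
  ("rdx", ["rdx", "edx", "dx", "dl", "dh"]),
  ("rsi", ["rsi", "esi", "si", "sil"]),
  ("rdi", ["rdi", "edi", "di", "dil"]),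
  ("rsp", ["rsp", "esp", "sp", "spl"]),
  ("rbp", ["rbp", "ebp", "bp", "bpl"]),
  ("r8", ["r8", "r8d", "r8w", "r8b"]),
  ("r9", ["r9", "r9d", "r9w", "r9b"]),
  ("r10", ["r10", "r10d", "r10w", "r10b"]),
  ("r11", ["r11", "r11d", "r11w", "r11b"]),
  ("r12", ["r12", "r12d", "r12w", "r12b"]),
  ("r13", ["r13", "r13d", "r13w", "r13b"]),
  ("r14", ["r14", "r14d", "r14w", "r14b"]),
  ("r15", ["r15", "r15d", "r15w", "r15b"])]

-- the 'for full_reg, aliases in x64_aliases.items(): if reg_name in aliases: return aliases' loop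
def pvScanA (r : String) : List (String × List String) → List String
  | [] => [r]
  | (_, aliases) :: rest => if PySem.Set.contains aliases r then aliases else pvScanA r rest

def get_register_aliases_py (reg_name : String) : List String :=
  pvScanA (PySem.Str.lower reg_name) pvGroupsA

-- ===== PORT B =====
-- Python 'a + b' on str: concatenation of code points (exact)
def pvCat (a b : String) : String := String.ofList (a.toList ++ b.toList)

-- Python 's[i]' as a 1-character string; Source B uses it only under guards that make i in range (exact there)
def pvAt (s : String) (i : Int) : String := ((PySem.Str.pyGet? s i).map (fun ch => String.ofList [ch])).getD ""

-- Source B after the numbered-register rule failed: the legacy a/b/c/d rule, then the si/di/sp/bp rule, then {r}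
def pvRestB (r : String) : List String :=
  -- legacy byte-addressable registers a/b/c/d: rCx, eCx, Cx, Cl, Ch
  let c : String :=
    if PySem.Str.len r == 3 && (pvAt r 0 == "r" || pvAt r 0 == "e") && pvAt r 2 == "x" then pvAt r 1
    else if PySem.Str.len r == 2 && (pvAt r 1 == "x" || pvAt r 1 == "l" || pvAt r 1 == "h") then pvAt r 0
    else ""
  if c ∈ (["a", "b", "c", "d"] : List String) then
    [pvCat (pvCat "r" c) "x", pvCat (pvCat "e" c) "x", pvCat c "x", pvCat c "l", pvCat c "h"]
  else
    -- pointer/index registers si, di, sp, bp: rB, eB, B, Bl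
    let b : String :=
      if PySem.Str.len r == 3 && (pvAt r 0 == "r" || pvAt r 0 == "e") then PySem.Str.slice r (some 1) none
      else if PySem.Str.len r == 3 && pvAt r 2 == "l" then PySem.Str.slice r none (some 2)
      else if PySem.Str.len r == 2 then r
      else ""
    if b ∈ (["si", "di", "sp", "bp"] : List String) then
      [pvCat "r" b, pvCat "e" b, b, pvCat b "l"]
    else [r]

-- B's rule-based decoding of the (already lowered) name, mirroring Source B's early returns
def pvDecodeB (r : String) : List String :=
  -- numbered registers r8..r15: canonical name plus d/w/b width suffixes
  let num : Option (List String) :=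
    if PySem.Str.startswith r "r" then
      let body0 := PySem.Str.slice r (some 1) none
      let body :=
        if PySem.Str.endswith body0 "d" || PySem.Str.endswith body0 "w" || PySem.Str.endswith body0 "b" then
          PySem.Str.slice body0 none (some (-1))
        else body0
      if body ∈ (["8", "9", "10", "11", "12", "13", "14", "15"] : List String) then
        let base := pvCat "r" body
        some [base, pvCat base "d", pvCat base "w", pvCat base "b"]
      else none
    else none
  match num with
  | some g => g
  | none => pvRestB r

def get_register_aliases_py_alt (reg_name : String) : List String :=
  pvDecodeB (PySem.Str.lower reg_name)

-- ===== PRECONDITION & SPEC =====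
def Spec_get_register_aliases_py (reg_name : String) (out : List String) : Prop := out = get_register_aliases_py_alt reg_name
instance (reg_name : String) (out : List String) : Decidable (Spec_get_register_aliases_py reg_name out) := by unfold Spec_get_register_aliases_py; infer_instance

-- ===== CLAIM (what is proved, stated in full; the proofs are below) =====
def Claim_equal_get_register_aliases_py : Prop := ∀ (reg_name : String), Dom_get_register_aliases_py reg_name → Spec_get_register_aliases_py reg_name (get_register_aliases_py reg_name)

-- ===== LEMMAS AND PROOFS =====
def pvAllAliases : List String := ["rax", "eax", "ax", "al", "ah", "rbx", "ebx", "bx", "bl", "bh", "rcx", "ecx", "cx", "cl", "ch", "rdx", "edx", "dx", "dl", "dh", "rsi", "esi", "si", "sil", "rdi", "edi", "di", "dil", "rsp", "esp", "sp", "spl", "rbp", "ebp", "bp", "bpl", "r8", "r8d", "r8w", "r8b", "r9", "r9d", "r9w", "r9b", "r10", "r10d", "r10w", "r10b", "r11", "r11d", "r11w", "r11b", "r12", "r12d", "r12w", "r12b", "r13", "r13d", "r13w", "r13b", "r14", "r14d", "r14w", "r14b", "r15", "r15d", "r15w", "r15b"]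

theorem pvStrEq (s : String) (l : List Char) (h : s.toList = l) : s = String.ofList l := by
  rw [← h, String.ofList_toList]

theorem pvCharLit (a c : Char) (s : String) (hs : s.toList = [c]) (h : String.ofList [a] = s) : a = c := by
  have := congrArg String.toList h
  rw [String.toList_ofList, hs] at this
  simpa using this

theorem pvSuffix (s : String) (t : List Char) (c : Char) (lit : String) (hlit : lit.toList = [c])
    (hs : s.toList = t) (h : PySem.Str.endswith s lit = true) : [c] <:+ t := by
  rw [PySem.Str.endswith_eq] at h
  have := (PySem.Chars.endswith_iff _ _).mp h
  rwa [hlit, hs] at this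

theorem pv_mem_case : ∀ s ∈ pvAllAliases, pvScanA s pvGroupsA = pvDecodeB s := by decide

theorem pv_groups_sub : ∀ p ∈ pvGroupsA, ∀ a ∈ p.2, a ∈ pvAllAliases := by decide

theorem pv_scan_nil (r : String) :
    ∀ L : List (String × List String), (∀ p ∈ L, r ∉ p.2) → pvScanA r L = [r] := by
  intro L
  induction L with
  | nil => intro _; rfl
  | cons p rest ih =>
    intro hL
    have hc : ¬ (PySem.Set.contains p.2 r = true) := fun hc =>
      hL p List.mem_cons_self (((PySem.Set.contains_iff _ _).mp hc))
    simp only [pvScanA]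
    rw [if_neg hc]
    exact ih (fun q hq => hL q (List.mem_cons_of_mem _ hq))

theorem pv_num_aux1 : ∀ bs ∈ (["8", "9", "10", "11", "12", "13", "14", "15"] : List String),
    ∀ ch ∈ (['d', 'w', 'b'] : List Char), String.ofList ('r' :: bs.toList ++ [ch]) ∈ pvAllAliases := by
  intro bs hbs ch hch
  fin_cases hbs <;> fin_cases hch <;> decide

theorem pv_num_aux2 : ∀ bs ∈ (["8", "9", "10", "11", "12", "13", "14", "15"] : List String),
    String.ofList ('r' :: bs.toList) ∈ pvAllAliases := by
  intro bs hbs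
  fin_cases hbs <;> decide

-- if B's numbered-register rule fires, r is one of the 32 numbered aliases
theorem pv_num_mem (r : String) (h1 : PySem.Str.startswith r "r" = true)
    (h2 : (if PySem.Str.endswith (PySem.Str.slice r (some 1) none) "d"
              || PySem.Str.endswith (PySem.Str.slice r (some 1) none) "w"
              || PySem.Str.endswith (PySem.Str.slice r (some 1) none) "b" then
            PySem.Str.slice (PySem.Str.slice r (some 1) none) none (some (-1))
          else PySem.Str.slice r (some 1) none)
        ∈ (["8", "9", "10", "11", "12", "13", "14", "15"] : List String)) :
    r ∈ pvAllAliases := by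
  have hpre : ['r'] <+: r.toList := by
    rw [PySem.Str.startswith_eq] at h1
    have := (PySem.Chars.startswith_iff _ _).mp h1
    have hr : ("r" : String).toList = ['r'] := by decide
    rwa [hr] at this
  obtain ⟨t, ht⟩ := hpre
  have hbody0 : (PySem.Str.slice r (some 1) none).toList = t := by
    rw [PySem.Str.toList_slice, PySem.Chars.slice_eq_listSlice,
      PySem.List.slice_from r.toList (by norm_num : (0:Int) ≤ 1), ← ht]
    simp
  split_ifs at h2 with hsuf
  · -- width suffix present: t = bs.toList ++ [ch]
    rw [Bool.or_eq_true, Bool.or_eq_true] at hsuf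
    obtain ⟨ch, hchmem, hcht⟩ : ∃ ch ∈ (['d', 'w', 'b'] : List Char), [ch] <:+ t := by
      rcases hsuf with (h' | h') | h'
      · exact ⟨'d', by decide, pvSuffix _ _ _ _ (by decide) hbody0 h'⟩
      · exact ⟨'w', by decide, pvSuffix _ _ _ _ (by decide) hbody0 h'⟩
      · exact ⟨'b', by decide, pvSuffix _ _ _ _ (by decide) hbody0 h'⟩
    obtain ⟨p, hp⟩ := hcht
    have hbodyl : (PySem.Str.slice (PySem.Str.slice r (some 1) none) none (some (-1))).toList = p := by
      rw [PySem.Str.slice_to_neg_one, hbody0, ← hp]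
      exact List.dropLast_concat
    have hr : r = String.ofList
        ('r' :: (PySem.Str.slice (PySem.Str.slice r (some 1) none) none (some (-1))).toList ++ [ch]) := by
      apply pvStrEq
      rw [hbodyl, ← ht, ← hp]
      rfl
    rw [hr]
    exact pv_num_aux1 _ h2 ch hchmem
  · -- no suffix: t = bs.toList
    have hr : r = String.ofList ('r' :: (PySem.Str.slice r (some 1) none).toList) := by
      apply pvStrEq
      rw [hbody0, ← ht]
      rfl
    rw [hr]
    exact pv_num_aux2 _ h2

theorem pv_letter_aux1 : ∀ a ∈ (['r', 'e'] : List Char), ∀ b ∈ (['a', 'b', 'c', 'd'] : List Char),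
    String.ofList [a, b, 'x'] ∈ pvAllAliases := by
  intro a ha b hb
  fin_cases ha <;> fin_cases hb <;> decide

theorem pv_letter_aux2 : ∀ a ∈ (['a', 'b', 'c', 'd'] : List Char), ∀ b ∈ (['x', 'l', 'h'] : List Char),
    String.ofList [a, b] ∈ pvAllAliases := by
  intro a ha b hb
  fin_cases ha <;> fin_cases hb <;> decide

theorem pv_len_eq (r : String) (n : Nat) (h : (PySem.Str.len r == (n : Int)) = true) : r.toList.length = n := by
  rw [PySem.Str.len_eq] at h
  exact_mod_cast beq_iff_eq.mp h

-- if B's legacy a/b/c/d rule fires, r is one of those 20 aliases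
theorem pv_letter_mem (r : String)
    (hc : (if PySem.Str.len r == 3 && (pvAt r 0 == "r" || pvAt r 0 == "e") && pvAt r 2 == "x" then pvAt r 1
           else if PySem.Str.len r == 2 && (pvAt r 1 == "x" || pvAt r 1 == "l" || pvAt r 1 == "h") then pvAt r 0
           else "") ∈ (["a", "b", "c", "d"] : List String)) :
    r ∈ pvAllAliases := by
  split_ifs at hc with hA hB
  · -- len 3, r = (r|e) C x
    simp only [Bool.and_eq_true, Bool.or_eq_true] at hA
    obtain ⟨⟨h3, hre⟩, hx⟩ := hA
    obtain ⟨a, b, c3, hl⟩ := List.length_eq_three.mp (pv_len_eq r 3 h3)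
    have hr : r = String.ofList [a, b, c3] := pvStrEq r _ hl
    rw [hr] at hre hx hc
    simp only [pvAt, PySem.Str.pyGet?, PySem.Chars.pyGet?_eq_listPyGet?, String.toList_ofList,
      PySem.List.pyGet?, PySem.List.pyIdx?, beq_iff_eq] at hre hx hc
    have hc3 : c3 = 'x' := pvCharLit _ _ _ (by decide) hx
    have hb : b ∈ (['a', 'b', 'c', 'd'] : List Char) := by
      simp only [List.mem_cons, List.not_mem_nil, or_false] at hc
      rcases hc with h | h | h | h
      · simp [pvCharLit _ _ _ (by decide : ("a":String).toList = ['a']) h]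
      · simp [pvCharLit _ _ _ (by decide : ("b":String).toList = ['b']) h]
      · simp [pvCharLit _ _ _ (by decide : ("c":String).toList = ['c']) h]
      · simp [pvCharLit _ _ _ (by decide : ("d":String).toList = ['d']) h]
    have ha : a ∈ (['r', 'e'] : List Char) := by
      rcases hre with h | h
      · simp [pvCharLit _ _ _ (by decide : ("r":String).toList = ['r']) h]
      · simp [pvCharLit _ _ _ (by decide : ("e":String).toList = ['e']) h]
    rw [hr, hc3]
    exact pv_letter_aux1 a ha b hb
  · -- len 2, r = C (x|l|h)
    simp only [Bool.and_eq_true, Bool.or_eq_true] at hB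
    obtain ⟨h2, hxlh⟩ := hB
    obtain ⟨a, b, hl⟩ := List.length_eq_two.mp (pv_len_eq r 2 h2)
    have hr : r = String.ofList [a, b] := pvStrEq r _ hl
    rw [hr] at hxlh hc
    simp only [pvAt, PySem.Str.pyGet?, PySem.Chars.pyGet?_eq_listPyGet?, String.toList_ofList,
      PySem.List.pyGet?, PySem.List.pyIdx?, beq_iff_eq] at hxlh hc
    have ha : a ∈ (['a', 'b', 'c', 'd'] : List Char) := by
      simp only [List.mem_cons, List.not_mem_nil, or_false] at hc
      rcases hc with h | h | h | h
      · simp [pvCharLit _ _ _ (by decide : ("a":String).toList = ['a']) h]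
      · simp [pvCharLit _ _ _ (by decide : ("b":String).toList = ['b']) h]
      · simp [pvCharLit _ _ _ (by decide : ("c":String).toList = ['c']) h]
      · simp [pvCharLit _ _ _ (by decide : ("d":String).toList = ['d']) h]
    have hb : b ∈ (['x', 'l', 'h'] : List Char) := by
      rcases hxlh with (h | h) | h
      · simp [pvCharLit _ _ _ (by decide : ("x":String).toList = ['x']) h]
      · simp [pvCharLit _ _ _ (by decide : ("l":String).toList = ['l']) h]
      · simp [pvCharLit _ _ _ (by decide : ("h":String).toList = ['h']) h]
    rw [hr]
    exact pv_letter_aux2 a ha b hb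
  · simp at hc

theorem pv_pair_aux1 : ∀ a ∈ (['r', 'e'] : List Char), ∀ p ∈ (["si", "di", "sp", "bp"] : List String),
    String.ofList (a :: p.toList) ∈ pvAllAliases := by
  intro a ha p hp
  fin_cases ha <;> fin_cases hp <;> decide

theorem pv_pair_aux2 : ∀ p ∈ (["si", "di", "sp", "bp"] : List String),
    String.ofList (p.toList ++ ['l']) ∈ pvAllAliases := by
  intro p hp
  fin_cases hp <;> decide

-- if B's si/di/sp/bp rule fires, r is one of those 16 aliases
theorem pv_pair_mem (r : String)
    (hb : (if PySem.Str.len r == 3 && (pvAt r 0 == "r" || pvAt r 0 == "e") then PySem.Str.slice r (some 1) none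
           else if PySem.Str.len r == 3 && pvAt r 2 == "l" then PySem.Str.slice r none (some 2)
           else if PySem.Str.len r == 2 then r
           else "") ∈ (["si", "di", "sp", "bp"] : List String)) :
    r ∈ pvAllAliases := by
  split_ifs at hb with hA hB hC
  · -- len 3, (r|e) ++ base
    simp only [Bool.and_eq_true, Bool.or_eq_true] at hA
    obtain ⟨h3, hre⟩ := hA
    obtain ⟨a, b, c3, hl⟩ := List.length_eq_three.mp (pv_len_eq r 3 h3)
    have hr : r = String.ofList [a, b, c3] := pvStrEq r _ hl
    have hsl : (PySem.Str.slice r (some 1) none).toList = [b, c3] := by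
      rw [PySem.Str.toList_slice, PySem.Chars.slice_eq_listSlice,
        PySem.List.slice_from r.toList (by norm_num : (0:Int) ≤ 1), hl]
      simp
    have hsl2 : PySem.Str.slice r (some 1) none = String.ofList [b, c3] := pvStrEq _ _ hsl
    rw [hr] at hre
    simp only [pvAt, PySem.Str.pyGet?, PySem.Chars.pyGet?_eq_listPyGet?, String.toList_ofList,
      PySem.List.pyGet?, PySem.List.pyIdx?, beq_iff_eq] at hre
    have ha : a ∈ (['r', 'e'] : List Char) := by
      rcases hre with h | h
      · simp [pvCharLit _ _ _ (by decide : ("r":String).toList = ['r']) h]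
      · simp [pvCharLit _ _ _ (by decide : ("e":String).toList = ['e']) h]
    rw [hsl2] at hb
    have hr2 : r = String.ofList (a :: (PySem.Str.slice r (some 1) none).toList) := by
      rw [hsl2, String.toList_ofList]
      exact hr
    rw [hr2, hsl2, String.toList_ofList, ← String.toList_ofList (l := [b, c3])]
    exact pv_pair_aux1 a ha _ hb
  · -- len 3, base ++ l
    simp only [Bool.and_eq_true] at hB
    obtain ⟨h3, hlch⟩ := hB
    obtain ⟨a, b, c3, hl⟩ := List.length_eq_three.mp (pv_len_eq r 3 h3)
    have hr : r = String.ofList [a, b, c3] := pvStrEq r _ hl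
    rw [hr] at hlch
    simp only [pvAt, PySem.Str.pyGet?, PySem.Chars.pyGet?_eq_listPyGet?, String.toList_ofList,
      PySem.List.pyGet?, PySem.List.pyIdx?, beq_iff_eq] at hlch
    have hc3 : c3 = 'l' := pvCharLit _ _ _ (by decide) hlch
    have hsl : (PySem.Str.slice r none (some 2)).toList = [a, b] := by
      rw [PySem.Str.toList_slice, PySem.Chars.slice_eq_listSlice,
        PySem.List.slice_to r.toList (by norm_num : (0:Int) ≤ 2), hl]
      simp
    have hsl2 : PySem.Str.slice r none (some 2) = String.ofList [a, b] := pvStrEq _ _ hsl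
    rw [hsl2] at hb
    have hr2 : r = String.ofList ((PySem.Str.slice r none (some 2)).toList ++ ['l']) := by
      rw [hsl, hr, hc3]
      simp
    rw [hr2, hsl, ← String.toList_ofList (l := [a, b])]
    exact pv_pair_aux2 _ hb
  · -- len 2: r itself
    have haux : ∀ x ∈ (["si", "di", "sp", "bp"] : List String), x ∈ pvAllAliases := by decide
    exact haux r hb
  · simp at hb

theorem pv_rest (r : String) (h : r ∉ pvAllAliases) : pvRestB r = [r] := by
  unfold pvRestB
  rw [if_neg (fun hc => h (pv_letter_mem r hc))]
  rw [if_neg (fun hb => h (pv_pair_mem r hb))]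

theorem pv_not_mem_case (r : String) (h : r ∉ pvAllAliases) : pvDecodeB r = [r] := by
  unfold pvDecodeB
  by_cases h1 : PySem.Str.startswith r "r" = true
  · simp only [h1, if_true]
    by_cases h2 : (if PySem.Str.endswith (PySem.Str.slice r (some 1) none) "d"
              || PySem.Str.endswith (PySem.Str.slice r (some 1) none) "w"
              || PySem.Str.endswith (PySem.Str.slice r (some 1) none) "b" then
            PySem.Str.slice (PySem.Str.slice r (some 1) none) none (some (-1))
          else PySem.Str.slice r (some 1) none)
        ∈ (["8", "9", "10", "11", "12", "13", "14", "15"] : List String)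
    · exact absurd (pv_num_mem r h1 h2) h
    · rw [if_neg h2]
      exact pv_rest r h
  · simp only [Bool.not_eq_true] at h1
    simp only [h1, Bool.false_eq_true, if_false]
    exact pv_rest r h

theorem pv_main (r : String) : pvScanA r pvGroupsA = pvDecodeB r := by
  by_cases h : r ∈ pvAllAliases
  · exact pv_mem_case r h
  · rw [pv_not_mem_case r h]
    exact pv_scan_nil r pvGroupsA (fun p hp hr => h (pv_groups_sub p hp r hr))

-- ===== VERDICT (by name: the statement is the Claim_ definition above) =====
theorem get_register_aliases_py_spec : Claim_equal_get_register_aliases_py := by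
  intro r _
  unfold Spec_get_register_aliases_py get_register_aliases_py get_register_aliases_py_alt
  exact pv_main _
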